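-- pv_equiv track=rewrite | github.com/ScRiPt1337/raw_Git-Suck | app.py | rawtogit
-- ===== SOURCE A (Python) =====
-- def rawtogit(s):
--     str1 = ""
--     z = 1
--     for ele in s:
--         if z >= 4:
--             str1 += "/" + ele
--         else:
--             str1 += ele
--         z = z + 1
--     return str1
-- ===== SOURCE B (Python) =====
-- def rawtogit(s):
--     items = list(s)
--     head = ''.join(items[:3])
--     tail = items[3:]
--     if not tail:
--         return head
--     return head + '/' + '/'.join(tail)
-- ===== Notes on version B (the rewrite author's own statement) =====
-- stated objective: simpler
-- what changed: Replaced the single loop with a running counter and per-element branch by a slice decomposition: join the first three elements, then slash-join the rest.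
import Mathlib
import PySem

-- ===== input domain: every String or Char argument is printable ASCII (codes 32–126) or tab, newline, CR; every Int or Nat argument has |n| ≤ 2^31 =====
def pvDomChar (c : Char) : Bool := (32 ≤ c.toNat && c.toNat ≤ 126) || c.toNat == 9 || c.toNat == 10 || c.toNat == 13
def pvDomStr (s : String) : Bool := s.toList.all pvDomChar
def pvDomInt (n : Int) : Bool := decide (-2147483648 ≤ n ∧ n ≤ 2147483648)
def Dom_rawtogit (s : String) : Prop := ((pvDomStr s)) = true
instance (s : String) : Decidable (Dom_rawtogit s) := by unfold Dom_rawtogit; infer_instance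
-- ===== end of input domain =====

-- B replaces A's counter-and-branch loop with a slice decomposition (first three joined, rest slash-joined); objective: simpler.
-- ===== PORT A =====
-- str1 += … on Python strings is ported as List Char append (Lean's String.append is opaque to the kernel)
def rawtogit (s : String) : String :=
  String.ofList
    ((s.toList.foldl
      (fun (st : List Char × Int) ele =>
        (if st.2 ≥ 4 then st.1 ++ ('/' :: [ele]) else st.1 ++ [ele], st.2 + 1))
      ([], 1)).1)

-- ===== PORT B =====
-- ''.join / '/'.join are ported with PySem.Chars.join over code points
def rawtogit_alt (s : String) : String :=
  let items := s.toList
  let head := PySem.Chars.join [] ((items.take 3).map (fun c => [c]))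
  let tail := items.drop 3
  if tail = [] then String.ofList head
  else String.ofList (head ++ ['/'] ++ PySem.Chars.join ['/'] (tail.map (fun c => [c])))

-- ===== PRECONDITION & SPEC =====
def Spec_rawtogit (s : String) (out : String) : Prop := out = rawtogit_alt s
instance (s : String) (out : String) : Decidable (Spec_rawtogit s out) := by unfold Spec_rawtogit; infer_instance

-- ===== CLAIM (what is proved, stated in full; the proofs are below) =====
def Claim_equal_rawtogit : Prop := ∀ (s : String), Dom_rawtogit s → Spec_rawtogit s (rawtogit s)

-- ===== LEMMAS AND PROOFS =====

-- once A's counter has reached 4, every remaining element is emitted with a '/' prefix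
theorem rawtogit_loop_ge4 (l : List Char) (p : List Char) (z : Int) (hz : 4 ≤ z) :
    (l.foldl
      (fun (st : List Char × Int) ele =>
        (if st.2 ≥ 4 then st.1 ++ ('/' :: [ele]) else st.1 ++ [ele], st.2 + 1))
      (p, z)).1 = p ++ l.flatMap (fun c => ['/', c]) := by
  induction l generalizing p z with
  | nil => simp
  | cons c cs ih =>
    simp only [List.foldl_cons, List.flatMap_cons]
    rw [if_pos hz, ih _ _ (by omega)]
    simp

-- '/'-joining a nonempty char list, with a leading '/', is the flat '/'-prefixed form
theorem slash_join (d : Char) (ds : List Char) :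
    '/' :: PySem.Chars.join ['/'] ((d :: ds).map (fun c => [c])) =
      (d :: ds).flatMap (fun c => ['/', c]) := by
  induction ds generalizing d with
  | nil => simp [PySem.Chars.join_singleton]
  | cons e es ih =>
    rw [List.map_cons, List.map_cons, PySem.Chars.join_cons_cons, List.flatMap_cons]
    have hthis := ih e
    rw [List.map_cons] at hthis
    simp only [List.cons_append, List.nil_append]
    rw [← hthis]

-- ===== VERDICT (by name: the statement is the Claim_ definition above) =====
theorem rawtogit_spec : Claim_equal_rawtogit := by
  intro s _
  unfold Spec_rawtogit rawtogit rawtogit_alt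
  match h : s.toList with
  | [] => simp
  | [a] => simp [PySem.Chars.join_singleton]
  | [a, b] => simp [PySem.Chars.join_cons_cons, PySem.Chars.join_singleton]
  | [a, b, c] => simp [PySem.Chars.join_cons_cons, PySem.Chars.join_singleton]
  | a :: b :: c :: d :: rest =>
    simp only [List.foldl_cons]
    norm_num
    rw [rawtogit_loop_ge4 rest [a, b, c, '/', d] 5 (by norm_num)]
    rw [if_neg (by simp)]
    have hj := slash_join d rest
    rw [List.map_cons] at hj
    rw [show PySem.Chars.join [] [[a], [b], [c]] = [a, b, c] from by
          simpa using PySem.Chars.join_nil_singletons [a, b, c]]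
    rw [hj, List.flatMap_cons, ← String.ofList_append]
    simp
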